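-- pv_equiv track=rewrite | github.com/amilacjay/isyntax | dbnormalizer/experiments/functionalDepExtractor.py | restructure_keys
-- ===== SOURCE A (Python) =====
-- def restructure_keys(fds, attrib):
--     final = []
--     for x in fds:
--         for y in x:
--             index = 0
--             loop = 0
--             simplelist = []
--             # s = [word for word in x if word.lower() not in [y.lower() for y in attrib]]
--             for S in y:
--                 if isattribute(S, attrib) == 0 and loop == 0 and (index + 1) < len(y):
--                     temp = y[index] + '_' + y[index + 1]
--                     if isattribute(temp, attrib) == -1:
--                         simplelist.append(temp)
--                     loop = loop + 1
--                 elif loop == 1: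
--                     loop = loop - 1
--                     index = index + 1
--                     continue
--                 elif isattribute(S, attrib) == -1 and loop == 0:
--                     simplelist.append(S)
--                 index = index + 1
--             final.append(simplelist)
--     restructured_final = []
--     for i, v in enumerate(final):
--         if i % 2 == 0:
--             restructured_final.append([final[i], final[i + 1]])
--         elif i % 2 != 0:
--             continue
--     return restructured_final
--
-- def isattribute(word, attrib):
--     if word.lower() not in [y.lower() for y in attrib]:
--         return 0
--     else:
--         return -1
-- ===== SOURCE B (Python) =====
-- def restructure_keys(fds, attrib):
--     low = {a.lower() for a in attrib}
--
--     def scan(toks):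
--         if not toks:
--             return []
--         head = toks[0]
--         if head.lower() in low:
--             return [head] + scan(toks[1:])
--         if len(toks) >= 2:
--             combined = head + '_' + toks[1]
--             rest = scan(toks[2:])
--             return ([combined] + rest) if combined.lower() in low else rest
--         return []
--
--     final = [scan(y) for x in fds for y in x]
--     return [[final[i], final[i + 1]] for i in range(0, len(final), 2)]
-- ===== Notes on version B (the rewrite author's own statement) =====
-- stated objective: simpler
-- what changed: Replaced A's loop-flag/continue state machine and enumerate-based pairing with a recursive scanner that consumes one or two tokens per step against a lowercase attribute set built once, and a stride-2 range comprehension for the pairing.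
import Mathlib
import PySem

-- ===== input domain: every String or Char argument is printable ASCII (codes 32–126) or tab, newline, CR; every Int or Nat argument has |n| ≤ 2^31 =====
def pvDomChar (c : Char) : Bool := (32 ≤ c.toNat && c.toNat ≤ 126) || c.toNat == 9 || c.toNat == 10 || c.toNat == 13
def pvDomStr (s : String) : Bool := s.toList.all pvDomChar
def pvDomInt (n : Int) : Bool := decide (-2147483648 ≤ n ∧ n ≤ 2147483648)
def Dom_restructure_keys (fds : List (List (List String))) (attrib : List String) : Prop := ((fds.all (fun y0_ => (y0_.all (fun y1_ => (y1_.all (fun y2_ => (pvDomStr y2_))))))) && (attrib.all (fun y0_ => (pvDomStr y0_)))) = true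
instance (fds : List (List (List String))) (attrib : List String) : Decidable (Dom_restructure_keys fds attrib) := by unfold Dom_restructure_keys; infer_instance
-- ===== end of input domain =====

-- B replaces A's loop-flag state machine with a recursive one-or-two-token scanner over a
-- lowercase attribute set built once, and pairs results with a stride-2 range (objective: simpler).


-- ===== PORT A =====
def isattribute (word : String) (attrib : List String) : Int :=
  if ¬ ((attrib.map (fun y => PySem.Str.lower y)).contains (PySem.Str.lower word) = true) then 0
  else -1

-- the body of A's inner 'for S in y' loop, state (index, loop, simplelist)
def aStep (y : List String) (attrib : List String) (st : Int × Int × List String) (S : String) :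
    Int × Int × List String :=
  let index := st.1
  let loop := st.2.1
  let simplelist := st.2.2
  if isattribute S attrib = 0 ∧ loop = 0 ∧ index + 1 < (y.length : Int) then
    -- guard makes both indices in range, so the .getD "" defaults are never used
    let temp := ((PySem.List.pyGet? y index).getD "") ++ "_" ++ ((PySem.List.pyGet? y (index + 1)).getD "")
    (index + 1, loop + 1, if isattribute temp attrib = -1 then simplelist ++ [temp] else simplelist)
  else if loop = 1 then
    (index + 1, loop - 1, simplelist)
  else if isattribute S attrib = -1 ∧ loop = 0 then
    (index + 1, loop, simplelist ++ [S])
  else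
    (index + 1, loop, simplelist)

def aScan (y : List String) (attrib : List String) : List String :=
  (y.foldl (aStep y attrib) (0, 0, [])).2.2

def restructure_keys (fds : List (List (List String))) (attrib : List String) :
    List (List (List String)) :=
  let final := fds.foldl (fun acc x => x.foldl (fun acc2 y => acc2 ++ [aScan y attrib]) acc) []
  -- 'final[i + 1]' raises IndexError in Python when len(final) is odd: Pre_ excludes that,
  -- the .getD [] default is never used under Pre_
  (PySem.List.enumerate final 0).foldl (fun racc iv =>
    if PySem.Int.mod iv.1 2 = 0 then
      racc ++ [[(PySem.List.pyGet? final iv.1).getD [], (PySem.List.pyGet? final (iv.1 + 1)).getD []]]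
    else racc) []

-- ===== PORT B =====
def bScan (low : PySem.Set String) : List String → List String
  | [] => []
  | h :: t =>
    if PySem.Set.contains low (PySem.Str.lower h) = true then h :: bScan low t
    else
      match t with
      | t1 :: t2 =>
        let combined := h ++ "_" ++ t1
        if PySem.Set.contains low (PySem.Str.lower combined) = true then combined :: bScan low t2
        else bScan low t2
      | [] => []

def restructure_keys_alt (fds : List (List (List String))) (attrib : List String) :
    List (List (List String)) :=
  let low := PySem.Set.ofList (attrib.map (fun a => PySem.Str.lower a))
  let final := fds.flatMap (fun x => x.map (fun y => bScan low y))
  -- 'final[i + 1]' raises IndexError in Python when len(final) is odd (excluded by Pre_)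
  (PySem.List.pyRange 0 (final.length : Int) 2).map (fun i =>
    [(PySem.List.pyGet? final i).getD [], (PySem.List.pyGet? final (i + 1)).getD []])

-- ===== PRECONDITION & SPEC =====
-- Pre_ excludes exactly the inputs where Python A raises IndexError: an odd total number of
-- dependency token lists (both A and B index final[i+1] past the end there).
def Pre_restructure_keys (fds : List (List (List String))) (attrib : List String) : Prop :=
  (fds.map List.length).sum % 2 = 0
instance (fds : List (List (List String))) (attrib : List String) :
    Decidable (Pre_restructure_keys fds attrib) := by unfold Pre_restructure_keys; infer_instance

def pvWitness_restructure_keys : List (List (List String)) × List String :=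
  ([[["a"], ["b"]]], ["a", "b"])

def Spec_restructure_keys (fds : List (List (List String))) (attrib : List String)
    (out : List (List (List String))) : Prop := out = restructure_keys_alt fds attrib
instance (fds : List (List (List String))) (attrib : List String) (out : List (List (List String))) :
    Decidable (Spec_restructure_keys fds attrib out) := by unfold Spec_restructure_keys; infer_instance

-- ===== CLAIM (what is proved, stated in full; the proofs are below) =====
def Claim_equal_restructure_keys : Prop := ∀ (fds : List (List (List String))) (attrib : List String), Dom_restructure_keys fds attrib → Pre_restructure_keys fds attrib → Spec_restructure_keys fds attrib (restructure_keys fds attrib)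

-- ===== LEMMAS AND PROOFS =====

-- the set B builds from attrib
def lowSet (attrib : List String) : PySem.Set String :=
  PySem.Set.ofList (attrib.map (fun a => PySem.Str.lower a))

lemma isattr_neg_iff (w : String) (attrib : List String) :
    isattribute w attrib = -1 ↔ PySem.Str.lower w ∈ lowSet attrib := by
  unfold isattribute lowSet
  rw [PySem.Set.mem_ofList]
  split_ifs with h <;> simp_all

lemma isattr_zero_iff (w : String) (attrib : List String) :
    isattribute w attrib = 0 ↔ PySem.Str.lower w ∉ lowSet attrib := by
  unfold isattribute lowSet
  rw [PySem.Set.mem_ofList]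
  split_ifs with h <;> simp_all

-- unfolding equations for bScan when only the head is known
lemma bScan_cons_mem (low : PySem.Set String) (h : String) (t : List String)
    (hm : PySem.Str.lower h ∈ low) :
    bScan low (h :: t) = h :: bScan low t := by
  cases t <;> simp [bScan, hm]

lemma bScan_single_nmem (low : PySem.Set String) (h : String)
    (hm : PySem.Str.lower h ∉ low) :
    bScan low [h] = [] := by
  simp [bScan, hm]

lemma bScan_cons2_nmem (low : PySem.Set String) (h t1 : String) (t2 : List String)
    (hm : PySem.Str.lower h ∉ low) :
    bScan low (h :: t1 :: t2)
      = if PySem.Str.lower (h ++ "_" ++ t1) ∈ low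
        then (h ++ "_" ++ t1) :: bScan low t2 else bScan low t2 := by
  simp [bScan, hm]

-- A's inner loop with loop = 0 computes bScan, shifting the index along the suffix
lemma scan_aux (attrib y : List String) : ∀ (n : Nat) (t : List String) (i : Nat) (acc : List String),
    t.length ≤ n → y.drop i = t →
    List.foldl (aStep y attrib) (((i : Int), 0, acc)) t
      = ((i : Int) + t.length, 0, acc ++ bScan (lowSet attrib) t) := by
  intro n
  induction n with
  | zero =>
    intro t i acc hle hdrop
    have ht : t = [] := List.eq_nil_of_length_eq_zero (Nat.le_zero.mp hle)
    subst ht; simp [bScan]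
  | succ n ih =>
    intro t i acc hle hdrop
    match t with
    | [] => simp [bScan]
    | S :: t' =>
      have hgetS : y[i]? = some S := by
        have h0 := List.getElem?_drop (xs := y) (i := i) (j := 0)
        rw [hdrop] at h0; simpa using h0.symm
      have hlen : y.length = i + t'.length + 1 := by
        have := congrArg List.length hdrop
        simp [List.length_drop] at this
        omega
      have hd1 : y.drop (i + 1) = t' := by
        have h := congrArg List.tail hdrop
        simpa [List.tail_drop] using h
      have hpyS : PySem.List.pyGet? y ((i : Int)) = some S := by
        rw [PySem.List.pyGet?_natCast, hgetS]
      by_cases hA : isattribute S attrib = -1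
      · have h0 : ¬ isattribute S attrib = 0 := by rw [hA]; decide
        have hmem : PySem.Str.lower S ∈ lowSet attrib := (isattr_neg_iff S attrib).mp hA
        have hstep : aStep y attrib ((i : Int), 0, acc) S = ((i : Int) + 1, 0, acc ++ [S]) := by
          simp [aStep, hA, h0]
        have hrec := ih t' (i + 1) (acc ++ [S])
          (by simp only [List.length_cons, List.length_nil] at hle; omega) hd1
        simp only [List.foldl_cons, hstep]
        rw [show ((i : Int) + 1) = ((i + 1 : Nat) : Int) by push_cast [List.length_cons, List.length_nil]; ring, hrec,
            bScan_cons_mem _ _ _ hmem]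
        refine Prod.ext ?_ (Prod.ext rfl ?_)
        · push_cast [List.length_cons, List.length_nil]; ring
        · simp
      · have h0 : isattribute S attrib = 0 := by
          unfold isattribute at *; split_ifs at * <;> simp_all
        have hcF : PySem.Str.lower S ∉ lowSet attrib := (isattr_zero_iff S attrib).mp h0
        cases t' with
        | nil =>
          have hnl : ¬ ((i : Int) + 1 < (y.length : Int)) := by
            rw [hlen]; push_cast [List.length_cons, List.length_nil]; omega
          have hstep : aStep y attrib ((i : Int), 0, acc) S = ((i : Int) + 1, 0, acc) := by
            simp [aStep, hA, hnl]
          rw [List.foldl_cons, hstep, List.foldl_nil, bScan_single_nmem _ _ hcF]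
          refine Prod.ext ?_ (Prod.ext rfl ?_)
          · push_cast [List.length_cons, List.length_nil]; ring
          · simp
        | cons T t'' =>
          have hlt : (i : Int) + 1 < (y.length : Int) := by rw [hlen]; push_cast [List.length_cons, List.length_nil]; omega
          have hgetT : y[i + 1]? = some T := by
            have h1 := List.getElem?_drop (xs := y) (i := i) (j := 1)
            rw [hdrop] at h1; simpa using h1.symm
          have hd2 : y.drop (i + 2) = t'' := by
            have h := congrArg List.tail hd1
            rw [show i + 2 = (i + 1) + 1 by omega]
            simpa [List.tail_drop] using h
          have hpyT : PySem.List.pyGet? y ((i : Int) + 1) = some T := by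
            rw [show ((i : Int) + 1) = ((i + 1 : Nat) : Int) by push_cast [List.length_cons, List.length_nil]; ring,
                PySem.List.pyGet?_natCast, hgetT]
          have hstep1 : aStep y attrib ((i : Int), 0, acc) S
              = ((i : Int) + 1, 1,
                 if isattribute (S ++ "_" ++ T) attrib = -1 then acc ++ [S ++ "_" ++ T] else acc) := by
            simp [aStep, h0, hlt, hpyS, hpyT]
          have hstep2 : ∀ sl : List String,
              aStep y attrib ((i : Int) + 1, 1, sl) T = ((i : Int) + 2, 0, sl) := by
            intro sl
            have hcond : ¬ (isattribute T attrib = 0 ∧ (1 : Int) = 0 ∧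
                (i : Int) + 1 + 1 < (y.length : Int)) := by
              rintro ⟨-, h, -⟩; exact one_ne_zero h
            simp [aStep, hcond, Prod.ext_iff]
            constructor <;> ring_nf
          rw [List.foldl_cons, List.foldl_cons, hstep1, hstep2]
          rw [show ((i : Int) + 2) = ((i + 2 : Nat) : Int) by push_cast [List.length_cons, List.length_nil]; ring]
          rw [ih t'' (i + 2) _ (by simp only [List.length_cons, List.length_nil] at hle; omega) hd2,
              bScan_cons2_nmem _ _ _ _ hcF]
          by_cases hc : isattribute (S ++ "_" ++ T) attrib = -1
          · have hmemT : PySem.Str.lower (S ++ "_" ++ T) ∈ lowSet attrib :=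
              (isattr_neg_iff _ attrib).mp hc
            rw [if_pos hc, if_pos hmemT]
            refine Prod.ext ?_ (Prod.ext rfl ?_)
            · push_cast [List.length_cons, List.length_nil]; ring
            · simp
          · have hcT : PySem.Str.lower (S ++ "_" ++ T) ∉ lowSet attrib := fun h =>
              hc ((isattr_neg_iff _ attrib).mpr h)
            rw [if_neg hc, if_neg hcT]
            refine Prod.ext ?_ (Prod.ext rfl rfl)
            push_cast [List.length_cons, List.length_nil]; ring

lemma aScan_eq_bScan (y attrib : List String) : aScan y attrib = bScan (lowSet attrib) y := by
  unfold aScan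
  have h := scan_aux attrib y y.length y 0 [] le_rfl (by simp)
  simpa using congrArg (fun p => p.2.2) h

-- shared recursive shape of the two pairing passes
def pairUp : List (List String) → List (List (List String))
  | a :: b :: t => [a, b] :: pairUp t
  | [a] => [[a, []]]
  | [] => []

-- a small step-2 induction principle for pyRange (pyRange_of_pos gives the closed form)
lemma pyRange2_nil (a b : Int) (h : b ≤ a) : PySem.List.pyRange a b 2 = [] := by
  rw [PySem.List.pyRange_of_pos a b (by norm_num)]
  simp [show ¬ a < b by omega]

lemma pyRange2_cons (a b : Int) (h : a < b) :
    PySem.List.pyRange a b 2 = a :: PySem.List.pyRange (a + 2) b 2 := by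
  rw [PySem.List.pyRange_of_pos a b (by norm_num), PySem.List.pyRange_of_pos (a + 2) b (by norm_num)]
  by_cases h2 : a + 2 < b
  · have hn : ((b - a + 2 - 1) / 2).toNat = ((b - (a + 2) + 2 - 1) / 2).toNat + 1 := by omega
    simp only [if_pos h, if_pos h2, hn, List.range_succ_eq_map, List.map_cons, List.map_map]
    refine congrArg₂ _ (by ring) (List.map_congr_left ?_)
    intro k _
    show a + 2 * ((k : Int) + 1) = a + 2 + 2 * (k : Int)
    ring
  · have hn : ((b - a + 2 - 1) / 2).toNat = 1 := by omega
    simp [if_pos h, if_neg h2, hn, List.range_succ]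

-- A's pairing fold over an enumerate suffix computes pairUp
lemma pairA_aux (F : List (List String)) : ∀ (n : Nat) (t : List (List String)) (i : Nat)
    (acc : List (List (List String))), t.length ≤ n → F.drop i = t → i % 2 = 0 →
    List.foldl (fun racc iv =>
        if PySem.Int.mod iv.1 2 = 0 then
          racc ++ [[(PySem.List.pyGet? F iv.1).getD [], (PySem.List.pyGet? F (iv.1 + 1)).getD []]]
        else racc) acc (PySem.List.enumerate t (i : Int))
      = acc ++ pairUp t := by
  intro n
  induction n with
  | zero =>
    intro t i acc hle hdrop hpar
    have ht : t = [] := List.eq_nil_of_length_eq_zero (Nat.le_zero.mp hle)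
    subst ht; simp [pairUp, PySem.List.enumerate_nil]
  | succ n ih =>
    intro t i acc hle hdrop hpar
    have hmodi : PySem.Int.mod ((i : Int)) 2 = 0 := by
      simp [PySem.Int.mod_eq_zero_iff_dvd]
      omega
    match t with
    | [] => simp [pairUp, PySem.List.enumerate_nil]
    | [a] =>
      have hgeta : F[i]? = some a := by
        have h0 := List.getElem?_drop (xs := F) (i := i) (j := 0)
        rw [hdrop] at h0; simpa using h0.symm
      have hlen : F.length = i + 1 := by
        have := congrArg List.length hdrop
        simp [List.length_drop] at this
        omega
      have hnone : F[i + 1]? = none := by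
        rw [List.getElem?_eq_none]; omega
      have hga : (PySem.List.pyGet? F ((i : Int))).getD [] = a := by
        rw [PySem.List.pyGet?_natCast, hgeta]; rfl
      have hgb : (PySem.List.pyGet? F ((i : Int) + 1)).getD [] = [] := by
        rw [show ((i : Int) + 1) = ((i + 1 : Nat) : Int) by push_cast [List.length_cons, List.length_nil]; ring,
            PySem.List.pyGet?_natCast, hnone]
        rfl
      rw [PySem.List.enumerate_cons, PySem.List.enumerate_nil, List.foldl_cons, List.foldl_nil]
      rw [if_pos hmodi, hga, hgb]
      simp [pairUp]
    | a :: b :: t' =>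
      have hgeta : F[i]? = some a := by
        have h0 := List.getElem?_drop (xs := F) (i := i) (j := 0)
        rw [hdrop] at h0; simpa using h0.symm
      have hgetb : F[i + 1]? = some b := by
        have h1 := List.getElem?_drop (xs := F) (i := i) (j := 1)
        rw [hdrop] at h1; simpa using h1.symm
      have hd2 : F.drop (i + 2) = t' := by
        have h := congrArg List.tail (congrArg List.tail hdrop)
        rw [show i + 2 = (i + 1) + 1 by omega]
        simpa [List.tail_drop] using h
      have hga : (PySem.List.pyGet? F ((i : Int))).getD [] = a := by
        rw [PySem.List.pyGet?_natCast, hgeta]; rfl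
      have hgb : (PySem.List.pyGet? F ((i : Int) + 1)).getD [] = b := by
        rw [show ((i : Int) + 1) = ((i + 1 : Nat) : Int) by push_cast [List.length_cons, List.length_nil]; ring,
            PySem.List.pyGet?_natCast, hgetb]
        rfl
      have hmodi1 : ¬ PySem.Int.mod ((i : Int) + 1) 2 = 0 := by
        simp [PySem.Int.mod_eq_zero_iff_dvd]
        omega
      rw [PySem.List.enumerate_cons, PySem.List.enumerate_cons, List.foldl_cons, List.foldl_cons]
      rw [if_pos hmodi, hga, hgb, if_neg hmodi1]
      rw [show ((i : Int) + 1 + 1) = ((i + 2 : Nat) : Int) by push_cast [List.length_cons, List.length_nil]; ring]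
      rw [ih t' (i + 2) _ (by simp only [List.length_cons, List.length_nil] at hle; omega) hd2 (by omega)]
      simp [pairUp, List.append_assoc]

-- B's stride-2 range map computes pairUp
lemma pairB_aux (F : List (List String)) : ∀ (n : Nat) (t : List (List String)) (i : Nat),
    t.length ≤ n → F.drop i = t →
    (PySem.List.pyRange (i : Int) (F.length : Int) 2).map (fun j =>
        [(PySem.List.pyGet? F j).getD [], (PySem.List.pyGet? F (j + 1)).getD []])
      = pairUp t := by
  intro n
  induction n with
  | zero =>
    intro t i hle hdrop
    have ht : t = [] := List.eq_nil_of_length_eq_zero (Nat.le_zero.mp hle)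
    subst ht
    have hge : F.length ≤ i := by
      have := congrArg List.length hdrop
      simp [List.length_drop] at this
      omega
    rw [pyRange2_nil _ _ (by exact_mod_cast hge)]
    simp [pairUp]
  | succ n ih =>
    intro t i hle hdrop
    match t with
    | [] =>
      have hge : F.length ≤ i := by
        have := congrArg List.length hdrop
        simp [List.length_drop] at this
        omega
      rw [pyRange2_nil _ _ (by exact_mod_cast hge)]
      simp [pairUp]
    | [a] =>
      have hgeta : F[i]? = some a := by
        have h0 := List.getElem?_drop (xs := F) (i := i) (j := 0)
        rw [hdrop] at h0; simpa using h0.symm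
      have hlen : F.length = i + 1 := by
        have := congrArg List.length hdrop
        simp [List.length_drop] at this
        omega
      have hnone : F[i + 1]? = none := by
        rw [List.getElem?_eq_none]; omega
      have hga : (PySem.List.pyGet? F ((i : Int))).getD [] = a := by
        rw [PySem.List.pyGet?_natCast, hgeta]; rfl
      have hgb : (PySem.List.pyGet? F ((i : Int) + 1)).getD [] = [] := by
        rw [show ((i : Int) + 1) = ((i + 1 : Nat) : Int) by push_cast [List.length_cons, List.length_nil]; ring,
            PySem.List.pyGet?_natCast, hnone]
        rfl
      rw [pyRange2_cons _ _ (by rw [hlen]; push_cast [List.length_cons, List.length_nil]; omega),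
          pyRange2_nil _ _ (by rw [hlen]; push_cast [List.length_cons, List.length_nil]; omega)]
      rw [List.map_cons, List.map_nil, hga, hgb]
      simp [pairUp]
    | a :: b :: t' =>
      have hgeta : F[i]? = some a := by
        have h0 := List.getElem?_drop (xs := F) (i := i) (j := 0)
        rw [hdrop] at h0; simpa using h0.symm
      have hgetb : F[i + 1]? = some b := by
        have h1 := List.getElem?_drop (xs := F) (i := i) (j := 1)
        rw [hdrop] at h1; simpa using h1.symm
      have hd2 : F.drop (i + 2) = t' := by
        have h := congrArg List.tail (congrArg List.tail hdrop)
        rw [show i + 2 = (i + 1) + 1 by omega]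
        simpa [List.tail_drop] using h
      have hlen : i + 2 ≤ F.length := by
        have := congrArg List.length hdrop
        simp [List.length_drop] at this
        omega
      have hga : (PySem.List.pyGet? F ((i : Int))).getD [] = a := by
        rw [PySem.List.pyGet?_natCast, hgeta]; rfl
      have hgb : (PySem.List.pyGet? F ((i : Int) + 1)).getD [] = b := by
        rw [show ((i : Int) + 1) = ((i + 1 : Nat) : Int) by push_cast [List.length_cons, List.length_nil]; ring,
            PySem.List.pyGet?_natCast, hgetb]
        rfl
      rw [pyRange2_cons _ _ (by push_cast; omega)]
      rw [show ((i : Int) + 2) = ((i + 2 : Nat) : Int) by push_cast [List.length_cons, List.length_nil]; ring]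
      rw [List.map_cons, ih t' (i + 2) (by simp only [List.length_cons, List.length_nil] at hle; omega) hd2]
      rw [hga, hgb]
      simp [pairUp]

-- the two passes build the same 'final' list
lemma finals_eq (fds : List (List (List String))) (attrib : List String) :
    fds.foldl (fun acc x => x.foldl (fun acc2 y => acc2 ++ [aScan y attrib]) acc) []
      = fds.flatMap (fun x => x.map (fun y =>
          bScan (PySem.Set.ofList (attrib.map (fun a => PySem.Str.lower a))) y)) := by
  have h1 : ∀ (acc : List (List String)) (x : List (List String)),
      List.foldl (fun acc2 y => acc2 ++ [aScan y attrib]) acc x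
        = acc ++ x.map (fun y =>
            bScan (PySem.Set.ofList (attrib.map (fun a => PySem.Str.lower a))) y) := by
    intro acc x
    rw [PySem.List.foldl_append_singleton_eq_map]
    congr 1
    exact List.map_congr_left (fun y _ => aScan_eq_bScan y attrib)
  calc fds.foldl (fun acc x => x.foldl (fun acc2 y => acc2 ++ [aScan y attrib]) acc) []
      = fds.foldl (fun acc x => acc ++ x.map (fun y =>
          bScan (PySem.Set.ofList (attrib.map (fun a => PySem.Str.lower a))) y)) [] :=
        congrArg (fun f => List.foldl f ([] : List (List String)) fds)
          (funext (fun acc => funext (fun x => h1 acc x)))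
    _ = _ := by
        rw [PySem.List.foldl_append_eq_flatMap]
        simp

-- ===== VERDICT (by name: the statement is the Claim_ definition above) =====
theorem restructure_keys_spec : Claim_equal_restructure_keys := by
  intro fds attrib _hdom _hpre
  unfold Spec_restructure_keys
  simp only [restructure_keys, restructure_keys_alt]
  rw [finals_eq fds attrib]
  have hA := pairA_aux
    (fds.flatMap (fun x => x.map (fun y =>
      bScan (PySem.Set.ofList (attrib.map (fun a => PySem.Str.lower a))) y)))
    (fds.flatMap (fun x => x.map (fun y =>
      bScan (PySem.Set.ofList (attrib.map (fun a => PySem.Str.lower a))) y))).length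
    (fds.flatMap (fun x => x.map (fun y =>
      bScan (PySem.Set.ofList (attrib.map (fun a => PySem.Str.lower a))) y)))
    0 [] le_rfl (by simp) (by simp)
  have hB := pairB_aux
    (fds.flatMap (fun x => x.map (fun y =>
      bScan (PySem.Set.ofList (attrib.map (fun a => PySem.Str.lower a))) y)))
    (fds.flatMap (fun x => x.map (fun y =>
      bScan (PySem.Set.ofList (attrib.map (fun a => PySem.Str.lower a))) y))).length
    (fds.flatMap (fun x => x.map (fun y =>
      bScan (PySem.Set.ofList (attrib.map (fun a => PySem.Str.lower a))) y)))
    0 le_rfl (by simp)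
  simp only [Nat.cast_zero] at hA hB
  rw [hA, hB]
  simp
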